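-- pv_equiv track=rewrite | github.com/skarodev/skaro | src/skaro_core/phases/project_chat.py | _strip_file_block
-- ===== SOURCE A (Python) =====
-- def _strip_file_block(text: str, filepath: str) -> str:
--     """Remove a ``--- FILE: <filepath> ---`` block from text."""
--     lines = text.splitlines(True)
--     i = 0
--     while i < len(lines):
--         stripped = lines[i].strip()
--         if stripped.startswith("--- FILE:") and stripped.endswith("---"):
--             block_filepath = stripped[9:-3].strip()
--             if block_filepath == filepath:
--                 block_start = i
--                 i += 1
--                 while i < len(lines):
--                     if lines[i].strip() == "--- END FILE ---":
--                         return "".join(lines[:block_start] + lines[i + 1:])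
--                     i += 1
--                 return "".join(lines[:block_start])
--         i += 1
--     return text
-- ===== SOURCE B (Python) =====
-- def _strip_file_block(text: str, filepath: str) -> str:
--     """Remove a ``--- FILE: <filepath> ---`` block from text (single forward pass)."""
--     out = []
--     removing = False
--     done = False
--     for line in text.splitlines(True):
--         stripped = line.strip()
--         if removing:
--             if stripped == "--- END FILE ---":
--                 removing = False
--                 done = True
--         elif (not done and stripped.startswith("--- FILE:")
--               and stripped.endswith("---")
--               and stripped[9:-3].strip() == filepath):
--             removing = True
--         else:
--             out.append(line)
--     return "".join(out)
-- ===== Notes on version B (the rewrite author's own statement) =====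
-- stated objective: alternative
-- what changed: Replaces A's index-based while loop with a nested rescue scan plus list slicing/concatenation by a single forward pass over the lines with two state flags (removing/done) that builds the output incrementally.
import Mathlib
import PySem

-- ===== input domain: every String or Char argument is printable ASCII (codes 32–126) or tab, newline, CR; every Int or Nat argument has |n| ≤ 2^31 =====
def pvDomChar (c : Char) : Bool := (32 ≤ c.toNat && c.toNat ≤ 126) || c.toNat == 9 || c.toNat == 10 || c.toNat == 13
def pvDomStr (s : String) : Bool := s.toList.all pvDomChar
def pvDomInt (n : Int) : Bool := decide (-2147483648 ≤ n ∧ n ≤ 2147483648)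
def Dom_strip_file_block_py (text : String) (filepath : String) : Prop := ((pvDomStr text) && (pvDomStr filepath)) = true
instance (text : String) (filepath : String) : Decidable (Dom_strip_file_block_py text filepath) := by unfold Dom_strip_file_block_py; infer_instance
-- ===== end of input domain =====

-- B replaces A's index-based while loop (with an inner rescue scan and slice concatenation) by a
-- single forward pass over the lines with two state flags; objective: alternative (same cost).

-- shared primitive: Python's str.splitlines(keepends=True), exact on the Dom charset
-- (the only line breaks admitted by Dom are '\n', '\r' and '\r\n')
def pySplitlinesKeep : List Char → List Char → List (List Char)
  | [], acc => if acc.isEmpty then [] else [acc]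
  | '\r' :: '\n' :: rest, acc => (acc ++ ['\r', '\n']) :: pySplitlinesKeep rest []
  | c :: rest, acc =>
    if c = '\n' then (acc ++ ['\n']) :: pySplitlinesKeep rest []
    else if c = '\r' then (acc ++ ['\r']) :: pySplitlinesKeep rest []
    else pySplitlinesKeep rest (acc ++ [c])

-- ===== PORT A =====
-- the inner 'while i < len(lines): if lines[i].strip() == "--- END FILE ---": return …' scan:
-- returns the index of the first END line at or after i (none = the inner loop fell off)
def stripFileBlockA_inner (lines : List (List Char)) (i : Nat) : Option Nat :=
  if h : i < lines.length then
    if PySem.Chars.strip lines[i] = "--- END FILE ---".toList then some i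
    else stripFileBlockA_inner lines (i + 1)
  else none
termination_by lines.length - i

-- the outer while loop; 'some r' = an early 'return "".join(…)', 'none' = the loop fell off ('return text')
def stripFileBlockA_outer (lines : List (List Char)) (fp : List Char) (i : Nat) : Option (List Char) :=
  if h : i < lines.length then
    let stripped := PySem.Chars.strip lines[i]
    if PySem.Chars.startswith stripped "--- FILE:".toList && PySem.Chars.endswith stripped "---".toList then
      if PySem.Chars.strip (PySem.List.slice stripped (some 9) (some (-3))) = fp then
        match stripFileBlockA_inner lines (i + 1) with
        | some j => some ((lines.take i ++ lines.drop (j + 1)).flatten)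
        | none => some ((lines.take i).flatten)
      else stripFileBlockA_outer lines fp (i + 1)
    else stripFileBlockA_outer lines fp (i + 1)
  else none
termination_by lines.length - i

def strip_file_block_py (text : String) (filepath : String) : String :=
  match stripFileBlockA_outer (pySplitlinesKeep text.toList []) filepath.toList 0 with
  | some r => String.ofList r
  | none => text

-- ===== PORT B =====
-- B's single forward pass: state (removing, done, out)
def stripFileBlockB_go (fp : List Char) : List (List Char) → Bool → Bool → List Char → List Char
  | [], _, _, out => out
  | l :: t, removing, done, out =>
    let stripped := PySem.Chars.strip l
    if removing then
      if stripped = "--- END FILE ---".toList then stripFileBlockB_go fp t false true out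
      else stripFileBlockB_go fp t removing done out
    else if !done && PySem.Chars.startswith stripped "--- FILE:".toList
            && PySem.Chars.endswith stripped "---".toList
            && (PySem.Chars.strip (PySem.List.slice stripped (some 9) (some (-3))) == fp) then
      stripFileBlockB_go fp t true done out
    else stripFileBlockB_go fp t removing done (out ++ l)

def strip_file_block_py_alt (text : String) (filepath : String) : String :=
  String.ofList (stripFileBlockB_go filepath.toList (pySplitlinesKeep text.toList []) false false [])

-- ===== PRECONDITION & SPEC =====
def Spec_strip_file_block_py (text : String) (filepath : String) (out : String) : Prop := out = strip_file_block_py_alt text filepath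
instance (text : String) (filepath : String) (out : String) : Decidable (Spec_strip_file_block_py text filepath out) := by unfold Spec_strip_file_block_py; infer_instance

-- ===== CLAIM (what is proved, stated in full; the proofs are below) =====
def Claim_equal_strip_file_block_py : Prop := ∀ (text : String) (filepath : String), Dom_strip_file_block_py text filepath → Spec_strip_file_block_py text filepath (strip_file_block_py text filepath)

-- ===== LEMMAS AND PROOFS =====

-- joining the keepends-split lines gives back the original characters
theorem flatten_pySplitlinesKeep (cs acc : List Char) :
    (pySplitlinesKeep cs acc).flatten = acc ++ cs := by
  induction cs, acc using pySplitlinesKeep.induct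
  all_goals simp_all [pySplitlinesKeep]

-- B's output accumulator factors out
theorem stripFileBlockB_go_out (fp : List Char) (t : List (List Char)) (r d : Bool) (out : List Char) :
    stripFileBlockB_go fp t r d out = out ++ stripFileBlockB_go fp t r d [] := by
  induction t generalizing r d out with
  | nil => simp [stripFileBlockB_go]
  | cons l t ih =>
    rw [stripFileBlockB_go, stripFileBlockB_go]
    split_ifs with h1 h2 h3
    · rw [ih, ih false true []]
    · rw [ih, ih r d []]
    · rw [ih, ih true d []]
    · rw [ih _ _ (out ++ l), ih _ _ ([] ++ l)]; simp

-- once done, B appends every remaining line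
theorem stripFileBlockB_go_done (fp : List Char) (t : List (List Char)) :
    stripFileBlockB_go fp t false true [] = t.flatten := by
  induction t with
  | nil => rfl
  | cons l t ih =>
    rw [stripFileBlockB_go]
    simp
    rw [stripFileBlockB_go_out, ih]

-- B in removing state matches A's inner END-scan
theorem stripFileBlockB_removing_eq_inner (fp : List Char) (lines : List (List Char)) (j : Nat) :
    stripFileBlockB_go fp (lines.drop j) true false [] =
      (match stripFileBlockA_inner lines j with
       | some k => (lines.drop (k + 1)).flatten
       | none => []) := by
  by_cases h : j < lines.length
  · have hd : lines.drop j = lines[j] :: lines.drop (j + 1) := List.drop_eq_getElem_cons h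
    rw [hd, stripFileBlockB_go, stripFileBlockA_inner]
    simp only [dif_pos h]
    by_cases he : PySem.Chars.strip lines[j] = "--- END FILE ---".toList
    · simp only [if_pos he]
      exact stripFileBlockB_go_done fp _
    · simp only [if_neg he]
      exact stripFileBlockB_removing_eq_inner fp lines (j + 1)
  · rw [List.drop_eq_nil_of_le (by omega), stripFileBlockA_inner]
    simp [h, stripFileBlockB_go]
termination_by lines.length - j
decreasing_by omega

-- B's one step on a line, stated for each branch of its condition
theorem bgo_cons_true (fp l : List Char) (t : List (List Char)) (out : List Char)
    (hab : (PySem.Chars.startswith (PySem.Chars.strip l) "--- FILE:".toList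
        && PySem.Chars.endswith (PySem.Chars.strip l) "---".toList) = true)
    (h2 : PySem.Chars.strip (PySem.List.slice (PySem.Chars.strip l) (some 9) (some (-3))) = fp) :
    stripFileBlockB_go fp (l :: t) false false out = stripFileBlockB_go fp t true false out := by
  rw [stripFileBlockB_go, Bool.and_eq_true] at *
  simp_all

theorem bgo_cons_false (fp l : List Char) (t : List (List Char)) (out : List Char)
    (h : ¬ ((PySem.Chars.startswith (PySem.Chars.strip l) "--- FILE:".toList
        && PySem.Chars.endswith (PySem.Chars.strip l) "---".toList) = true
        ∧ PySem.Chars.strip (PySem.List.slice (PySem.Chars.strip l) (some 9) (some (-3))) = fp)) :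
    stripFileBlockB_go fp (l :: t) false false out = stripFileBlockB_go fp t false false (out ++ l) := by
  rw [stripFileBlockB_go]
  rw [if_neg (by simp)]
  rw [if_neg (by
    simp only [Bool.not_false, Bool.true_and, Bool.and_eq_true, beq_iff_eq]
    simp only [Bool.and_eq_true] at h
    tauto)]

-- main invariant: A's outer loop from index i agrees with B's pass over the remaining lines
theorem strip_file_block_invariant (fp : List Char) (lines : List (List Char)) (i : Nat) :
    (match stripFileBlockA_outer lines fp i with
      | some r => r
      | none => lines.flatten) =
    (lines.take i).flatten ++ stripFileBlockB_go fp (lines.drop i) false false [] := by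
  by_cases h : i < lines.length
  · have hd : lines.drop i = lines[i] :: lines.drop (i + 1) := List.drop_eq_getElem_cons h
    have htake : lines.take (i + 1) = lines.take i ++ [lines[i]] := by
      rw [List.take_add_one]; simp [List.getElem?_eq_getElem h]
    by_cases hab : (PySem.Chars.startswith (PySem.Chars.strip lines[i]) "--- FILE:".toList
        && PySem.Chars.endswith (PySem.Chars.strip lines[i]) "---".toList) = true
    · by_cases h2 : PySem.Chars.strip (PySem.List.slice (PySem.Chars.strip lines[i]) (some 9) (some (-3))) = fp
      · -- the FILE line matches: A dispatches on the inner scan, B enters removing state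
        conv_lhs => rw [stripFileBlockA_outer]
        simp only [dif_pos h, if_pos hab, if_pos h2]
        rw [hd, bgo_cons_true fp _ _ _ hab h2, stripFileBlockB_removing_eq_inner fp lines (i + 1)]
        cases hin : stripFileBlockA_inner lines (i + 1) with
        | some j => simp [List.flatten_append]
        | none => simp
      · -- FILE marker but wrong path: both move on, B appends the line
        conv_lhs => rw [stripFileBlockA_outer]
        simp only [dif_pos h, if_pos hab, if_neg h2]
        rw [strip_file_block_invariant fp lines (i + 1),
          hd, bgo_cons_false fp _ _ _ (fun hc => h2 hc.2), stripFileBlockB_go_out, htake,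
          List.flatten_append]
        simp
        exact (stripFileBlockB_go_out fp _ false false _).symm
    · -- not a FILE line: both move on, B appends the line
      conv_lhs => rw [stripFileBlockA_outer]
      simp only [dif_pos h, if_neg hab]
      rw [strip_file_block_invariant fp lines (i + 1),
        hd, bgo_cons_false fp _ _ _ (fun hc => hab hc.1), stripFileBlockB_go_out, htake,
        List.flatten_append]
      simp
      exact (stripFileBlockB_go_out fp _ false false _).symm
  · rw [List.drop_eq_nil_of_le (by omega), List.take_of_length_le (by omega), stripFileBlockA_outer]
    simp [h, stripFileBlockB_go]
termination_by lines.length - i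
decreasing_by all_goals omega

-- ===== VERDICT (by name: the statement is the Claim_ definition above) =====
theorem strip_file_block_py_spec : Claim_equal_strip_file_block_py := by
  intro text filepath _
  unfold Spec_strip_file_block_py strip_file_block_py strip_file_block_py_alt
  have hinv := strip_file_block_invariant filepath.toList (pySplitlinesKeep text.toList []) 0
  simp only [List.take_zero, List.drop_zero, List.flatten_nil, List.nil_append] at hinv
  match ho : stripFileBlockA_outer (pySplitlinesKeep text.toList []) filepath.toList 0 with
  | some r => rw [ho] at hinv; simp [← hinv]
  | none =>
      rw [ho] at hinv
      rw [flatten_pySplitlinesKeep] at hinv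
      simp at hinv
      rw [← hinv, String.ofList_toList]
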